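-- pv_equiv track=rewrite | github.com/ArslenBac2025/BacInfo | Algo(Msr Wissem)/Serie1/Serie2/exercise 8/ex8.py | Im
-- ===== SOURCE A (Python) =====
-- def Im(ch):
--     res = ""
--     i = ch.find('i')
--     if(i == -1): return 0
--
--     start = i
--     while(start != - 1 and ( ch[start] != '+' and ch[start] != '-' and ch[start] != '/' and ch[start] != '*')):
--         start -= 1
--
--     start += 1
--     end = i
--
--     if(start == end):
--         return 1
--     else:
--         for k in range(start, end):
--             res += ch[k]
--
--     return int(res)
-- ===== SOURCE B (Python) =====
-- def Im(ch):
--     acc = ""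
--     for c in ch:
--         if c == 'i':
--             return 1 if acc == "" else int(acc)
--         if c in '+-*/':
--             acc = ""
--         else:
--             acc += c
--     return 0
-- ===== Notes on version B (the rewrite author's own statement) =====
-- stated objective: simpler
-- what changed: A finds the first 'i', walks backwards character by character to the nearest operator, then copies the coefficient forwards in a second loop; B is a single forward pass that keeps the characters accumulated since the last operator and finishes at the first 'i'.
import Mathlib
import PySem

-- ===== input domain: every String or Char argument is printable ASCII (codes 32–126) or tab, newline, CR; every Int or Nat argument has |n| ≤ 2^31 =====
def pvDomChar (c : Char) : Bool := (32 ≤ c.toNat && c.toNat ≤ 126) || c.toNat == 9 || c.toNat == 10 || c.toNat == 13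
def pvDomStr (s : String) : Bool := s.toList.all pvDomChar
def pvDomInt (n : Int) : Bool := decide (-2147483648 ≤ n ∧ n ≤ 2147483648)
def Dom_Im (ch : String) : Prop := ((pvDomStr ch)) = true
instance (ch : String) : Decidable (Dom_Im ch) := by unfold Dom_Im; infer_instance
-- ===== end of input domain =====

-- B replaces A's find-then-backward-scan-then-substring-copy with one forward pass that
-- keeps the characters seen since the last operator and stops at the first 'i' (objective: simpler).

-- ===== PORT A =====
-- the backward while loop: 'while start != -1 and ch[start] not an operator: start -= 1';
-- the Nat argument is the current (nonnegative) value of start, the result is start after the loop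
def ImBack (l : List Char) : Nat → Int
  | 0 =>
    let c := PySem.List.pyGetD l (0 : Int) ' '   -- ch[start]; always in range (start ≤ index of 'i')
    if c ≠ '+' ∧ c ≠ '-' ∧ c ≠ '/' ∧ c ≠ '*' then -1 else 0
  | s + 1 =>
    let c := PySem.List.pyGetD l ((s : Int) + 1) ' '
    if c ≠ '+' ∧ c ≠ '-' ∧ c ≠ '/' ∧ c ≠ '*' then ImBack l s else ((s : Int) + 1)

def Im (ch : String) : Int :=
  let l := ch.toList
  let i := PySem.Str.find ch "i"
  if i = -1 then 0
  else
    let start := ImBack l i.toNat + 1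
    let stop := i                                -- 'end' in the Python
    if start = stop then 1
    else
      -- res built char by char: 'for k in range(start, end): res += ch[k]'
      let res := (PySem.List.pyRange start stop 1).foldl
        (fun r k => r ++ [PySem.List.pyGetD l k ' ']) ([] : List Char)
      match PySem.Int.ofChars? res with          -- int(res)
      | some v => v
      | none => 0                                -- Python raises ValueError here; excluded by Pre_Im

-- ===== PORT B =====
-- acc holds the characters accumulated since the last operator
def ImAltLoop (acc : List Char) : List Char → Int
  | [] => 0
  | c :: cs =>
    if c = 'i' then
      if acc = [] then 1
      else match PySem.Int.ofChars? acc with     -- int(acc)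
        | some v => v
        | none => 0                              -- ValueError; excluded by Pre_Im
    else if PySem.Chars.isIn [c] ['+', '-', '*', '/'] then ImAltLoop [] cs   -- c in '+-*/'
    else ImAltLoop (acc ++ [c]) cs

def Im_alt (ch : String) : Int := ImAltLoop [] ch.toList

-- ===== PRECONDITION & SPEC =====
def pvNotOp (c : Char) : Bool := !(c == '+' || c == '-' || c == '/' || c == '*')

-- Pre_ excludes exactly the inputs on which both Pythons raise ValueError: a first 'i' whose
-- (nonempty) run of non-operator characters before it is not accepted by int().
def Pre_Im (ch : String) : Prop :=
  'i' ∈ ch.toList →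
    (let coeff := ((ch.toList.takeWhile (fun c => c ≠ 'i')).reverse.takeWhile pvNotOp).reverse
     coeff = [] ∨ (PySem.Int.ofChars? coeff).isSome = true)
instance (ch : String) : Decidable (Pre_Im ch) := by unfold Pre_Im; infer_instance

def pvWitness_Im : String := "3+41i-7"

def Spec_Im (ch : String) (out : Int) : Prop := out = Im_alt ch
instance (ch : String) (out : Int) : Decidable (Spec_Im ch out) := by unfold Spec_Im; infer_instance

-- ===== CLAIM (what is proved, stated in full; the proofs are below) =====
def Claim_equal_Im : Prop := ∀ (ch : String), Dom_Im ch → Pre_Im ch → Spec_Im ch (Im ch)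

-- ===== LEMMAS AND PROOFS =====

-- how both programs finish on the coefficient run: empty → 1, else int()
def pvFinish (coeff : List Char) : Int :=
  if coeff = [] then 1
  else match PySem.Int.ofChars? coeff with
    | some v => v
    | none => 0

theorem takeWhile_append_cons_of_neg {α : Type} (p : α → Bool) (xs : List α) (y : α) (zs : List α)
    (hy : p y = false) : (xs ++ y :: zs).takeWhile p = xs.takeWhile p := by
  induction xs with
  | nil => simp [List.takeWhile_cons, hy]
  | cons x xs ih => by_cases hx : p x <;> simp [List.takeWhile_cons, hx, ih]

theorem length_takeWhile_eq_of {α : Type} (p : α → Bool) (l : List α) (j : Nat)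
    (hj : j < l.length) (hfail : p l[j] = false) (hall : ∀ m (hm : m < j), p (l[m]'(by omega)) = true) :
    (l.takeWhile p).length = j := by
  induction l generalizing j with
  | nil => simp at hj
  | cons x xs ih =>
    cases j with
    | zero => simp_all [List.takeWhile_cons]
    | succ j =>
      have hx : p x = true := hall 0 (by omega)
      simp only [List.takeWhile_cons, hx, if_true, List.length_cons]
      have := ih j (by simpa using hj) (by simpa using hfail)
        (fun m hm => by simpa using hall (m + 1) (by omega))
      omega

-- the suffix view of 'takeWhile on the reverse'
theorem reverse_takeWhile_reverse {α : Type} (p : α → Bool) (l : List α) :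
    (l.reverse.takeWhile p).reverse = l.drop (l.length - (l.reverse.takeWhile p).length) := by
  have hle : (l.reverse.takeWhile p).length ≤ l.length := by
    simpa using (List.takeWhile_prefix (l := l.reverse) p).length_le
  set n := (l.reverse.takeWhile p).length with hn
  have h1 : l.reverse.takeWhile p = l.reverse.take n :=
    List.prefix_iff_eq_take.mp (List.takeWhile_prefix p)
  rw [h1, List.take_reverse, List.reverse_reverse]

-- characterisation of s.find('i') for our single-character needle
theorem find_singleton_char (l : List Char) (c : Char) :
    PySem.Chars.find l [c] =
      if c ∈ l then (((l.takeWhile (fun x => x ≠ c)).length : Int)) else -1 := by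
  by_cases h : c ∈ l
  · simp only [h, if_true]
    have hinf : [c] <:+: l := (List.singleton_infix_iff c l).mpr h
    have hne : PySem.Chars.find l [c] ≠ -1 := by
      rw [Ne, PySem.Chars.find_eq_neg_one_iff]; simpa using hinf
    have hspec := PySem.Chars.findFrom_natCast_spec l [c] 0 (by omega)
      (by simpa [PySem.Chars.findFrom_zero] using hne)
    rw [show ((0 : Nat) : Int) = 0 by norm_num, PySem.Chars.findFrom_zero] at hspec
    obtain ⟨h0, hpre, hmin⟩ := hspec
    set j := (PySem.Chars.find l [c]).toNat with hjdef
    have hdropj : [c] <+: l.drop j := hpre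
    have hjlt : j < l.length := by
      by_contra hge
      rw [List.drop_eq_nil_of_le (by omega)] at hdropj
      simpa using hdropj
    have hlj : l[j] = c := by
      have := List.IsPrefix.getElem hdropj (i := 0) (by simp)
      simpa [List.getElem_drop] using this.symm
    have hprev : ∀ m (hm : m < j), (fun x => decide (x ≠ c)) (l[m]'(by omega)) = true := by
      intro m hm
      have hnp := hmin m (by omega) hm
      have : l[m]'(by omega) ≠ c := by
        intro heq
        apply hnp
        have : l.drop m = l[m]'(by omega) :: l.drop (m + 1) := by
          rw [List.drop_eq_getElem_cons (by omega)]
        rw [this, heq]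
        exact ⟨_, rfl⟩
      simpa using this
    have hlen : (l.takeWhile (fun x => x ≠ c)).length = j :=
      length_takeWhile_eq_of _ l j hjlt (by simp [hlj]) hprev
    rw [hlen, hjdef]
    omega
  · simp only [h, if_false]
    rw [PySem.Chars.find_eq_neg_one_iff]
    intro hinf
    exact h ((List.singleton_infix_iff c l).mp hinf)

theorem notOp_cond (c : Char) : (c ≠ '+' ∧ c ≠ '-' ∧ c ≠ '/' ∧ c ≠ '*') ↔ pvNotOp c = true := by
  simp only [pvNotOp, Bool.not_eq_true', Bool.or_eq_false_iff, beq_eq_false_iff_ne]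
  tauto

theorem isIn_singleton_mem (c : Char) (L : List Char) :
    PySem.Chars.isIn [c] L = true ↔ c ∈ L := by
  rw [PySem.Chars.isIn_iff_infix, List.singleton_infix_iff]

-- A's backward while loop computes: current index minus the operator-free run ending there
theorem ImBack_eq (l : List Char) (s : Nat) (hs : s < l.length) :
    ImBack l s = (s : Int) - ((l.take (s + 1)).reverse.takeWhile pvNotOp).length := by
  induction s with
  | zero =>
    have h0 : PySem.List.pyGetD l (0 : Int) ' ' = l[0] := by
      rw [PySem.List.pyGetD_eq_getElem l ' ' (by omega) (by exact_mod_cast hs)]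
      simp
    have ht : (l.take 1).reverse = [l[0]] := by
      rw [List.take_add_one, List.take_zero, List.getElem?_eq_getElem hs]; rfl
    rw [ImBack, h0, ht]
    by_cases hop : pvNotOp (l[0]) = true
    · rw [if_pos ((notOp_cond _).mpr hop)]
      simp [List.takeWhile_cons, hop]
    · rw [if_neg (fun hc => hop ((notOp_cond _).mp hc))]
      simp [List.takeWhile_cons, Bool.eq_false_iff.mpr hop]
  | succ s ih =>
    have hs' : s + 1 < l.length := hs
    have h0 : PySem.List.pyGetD l ((s : Int) + 1) ' ' = l[s + 1] := by
      have := PySem.List.pyGetD_eq_getElem l (i := (s : Int) + 1) ' ' (by omega)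
        (by exact_mod_cast hs')
      rw [this]; congr 1
    have ht : (l.take (s + 2)).reverse = l[s + 1] :: (l.take (s + 1)).reverse := by
      simp [List.take_add_one, List.getElem?_eq_getElem hs']
    rw [ImBack, h0, ht]
    by_cases hop : pvNotOp (l[s + 1]) = true
    · rw [if_pos ((notOp_cond _).mpr hop), ih (by omega)]
      have htw : (l[s + 1] :: (l.take (s + 1)).reverse).takeWhile pvNotOp
          = l[s + 1] :: ((l.take (s + 1)).reverse.takeWhile pvNotOp) := by
        simp [List.takeWhile_cons, hop]
      rw [htw, List.length_cons]
      push_cast; omega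
    · rw [if_neg (fun hc => hop ((notOp_cond _).mp hc))]
      have htw : (l[s + 1] :: (l.take (s + 1)).reverse).takeWhile pvNotOp = [] := by
        simp [List.takeWhile_cons, Bool.eq_false_iff.mpr hop]
      rw [htw]
      simp

-- A's res loop copies the slice l[a:b]
theorem foldl_range_get (l : List Char) (a b : Nat) (hb : b ≤ l.length) (r0 : List Char) :
    (PySem.List.pyRange (a : Int) (b : Int) 1).foldl
      (fun r k => r ++ [PySem.List.pyGetD l k ' ']) r0 = r0 ++ (l.drop a).take (b - a) := by
  induction hd : b - a generalizing a r0 with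
  | zero =>
    rw [PySem.List.pyRange_one_eq_nil (by omega)]
    simp
  | succ n ihn =>
    have hab : a < b := by omega
    rw [PySem.List.pyRange_one_cons (by exact_mod_cast hab)]
    rw [List.foldl_cons]
    have hget : PySem.List.pyGetD l (a : Int) ' ' = l[a]'(by omega) := by
      rw [PySem.List.pyGetD_eq_getElem l ' ' (by omega) (by push_cast; omega)]
      simp
    have hcast : ((a : Int) + 1) = ((a + 1 : Nat) : Int) := by push_cast; ring
    rw [hget, hcast, ihn (a + 1) (r0 ++ [l[a]'(by omega)]) (by omega)]
    have hsplit : (l.drop a).take (n + 1)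
        = l[a]'(by omega) :: (l.drop (a + 1)).take n := by
      rw [List.drop_eq_getElem_cons (by omega), List.take_succ_cons]
    rw [hsplit, List.append_assoc]
    rfl

-- B's forward loop: first-'i' split with the operator-free run since the last reset
theorem ImAltLoop_eq (l : List Char) (acc : List Char) (hacc : ∀ x ∈ acc, pvNotOp x = true) :
    ImAltLoop acc l =
      if 'i' ∈ l then
        pvFinish (((acc ++ l.takeWhile (fun c => c ≠ 'i')).reverse.takeWhile pvNotOp).reverse)
      else 0 := by
  induction l generalizing acc with
  | nil => simp [ImAltLoop]
  | cons c cs ih =>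
    by_cases hc : c = 'i'
    · subst hc
      have h1 : ('i' :: cs).takeWhile (fun c => c ≠ 'i') = [] := by
        simp [List.takeWhile_cons]
      have h2 : acc.reverse.takeWhile pvNotOp = acc.reverse := by
        rw [List.takeWhile_eq_self_iff.mpr (fun x hx => hacc x (by simpa using hx))]
      rw [ImAltLoop, if_pos rfl]
      rw [if_pos List.mem_cons_self, h1, List.append_nil, h2, List.reverse_reverse]
      unfold pvFinish
      by_cases ha : acc = [] <;> simp [ha]
    · have hmem : ('i' ∈ c :: cs) = ('i' ∈ cs) := by
        simp [List.mem_cons, Ne.symm hc]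
      by_cases hop : PySem.Chars.isIn [c] ['+', '-', '*', '/'] = true
      · have hopf : pvNotOp c = false := by
          have := (isIn_singleton_mem c _).mp hop
          fin_cases this <;> rfl
        rw [ImAltLoop, if_neg hc, if_pos hop, ih [] (by simp)]
        have h1 : (c :: cs).takeWhile (fun x => x ≠ 'i') = c :: cs.takeWhile (fun x => x ≠ 'i') := by
          simp [List.takeWhile_cons, hc]
        simp only [hmem]
        by_cases hi : 'i' ∈ cs
        · rw [if_pos hi, if_pos hi]
          congr 2
          rw [h1, List.nil_append]
          have : (acc ++ c :: cs.takeWhile (fun x => x ≠ 'i')).reverse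
              = (cs.takeWhile (fun x => x ≠ 'i')).reverse ++ c :: acc.reverse := by
            simp
          rw [this, takeWhile_append_cons_of_neg _ _ _ _ hopf]
        · rw [if_neg hi, if_neg hi]
      · have hopt : pvNotOp c = true := by
          rw [pvNotOp]
          have hnm := (fun h => hop ((isIn_singleton_mem c _).mpr h))
          simp only [List.mem_cons, List.mem_singleton] at hnm
          simp only [Bool.not_eq_true']
          by_contra hb
          simp only [Bool.not_eq_false, Bool.or_eq_true, beq_iff_eq] at hb
          rcases hb with ((h | h) | h) | h <;> exact hnm (by tauto)
        rw [ImAltLoop, if_neg hc, if_neg hop,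
          ih (acc ++ [c]) (fun x hx => (List.mem_append.mp hx).elim (fun h => hacc x h)
            (fun h => by simp at h; subst h; exact hopt))]
        have h1 : (c :: cs).takeWhile (fun x => x ≠ 'i') = c :: cs.takeWhile (fun x => x ≠ 'i') := by
          simp [List.takeWhile_cons, hc]
        simp only [hmem]
        rw [h1]
        have : acc ++ [c] ++ cs.takeWhile (fun x => x ≠ 'i')
            = acc ++ c :: cs.takeWhile (fun x => x ≠ 'i') := by simp
        rw [this]

-- the element right after the takeWhile prefix fails the predicate
theorem getElem_takeWhile_length {α : Type} (p : α → Bool) (l : List α)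
    (h : (l.takeWhile p).length < l.length) :
    p (l[(l.takeWhile p).length]'h) = false := by
  induction l with
  | nil => simp at h
  | cons x xs ih =>
    by_cases hx : p x
    · have h' : (xs.takeWhile p).length < xs.length := by
        have := h; simpa [List.takeWhile_cons, hx] using this
      have := ih h'
      simpa [List.takeWhile_cons, hx] using this
    · simpa [List.takeWhile_cons, Bool.eq_false_iff.mpr hx] using hx

theorem Im_spec : Claim_equal_Im := by
  intro ch _ _
  unfold Spec_Im
  simp only [Im, Im_alt]
  have hfind : PySem.Str.find ch "i" = PySem.Chars.find ch.toList ['i'] := by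
    simp
  by_cases h : 'i' ∈ ch.toList
  · set l := ch.toList with hl
    set tW := l.takeWhile (fun x => x ≠ 'i') with htW
    set i := tW.length with hi
    have hfind' : PySem.Str.find ch "i" = (i : Int) := by
      rw [hfind, find_singleton_char, if_pos h]
    have hiLen : i < l.length := by
      by_contra h2
      have hlen2 : l.length ≤ (l.takeWhile (fun x => x ≠ 'i')).length := by
        rw [← htW, ← hi]; omega
      have heq : l.takeWhile (fun x => x ≠ 'i') = l :=
        (List.takeWhile_prefix _).eq_of_length
          (le_antisymm (List.takeWhile_prefix _).length_le hlen2)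
      have h2' := List.takeWhile_eq_self_iff.mp heq 'i' h
      simp at h2'
    have htake : l.take i = tW := (List.prefix_iff_eq_take.mp (List.takeWhile_prefix _)).symm
    have hgetI : l[i]'hiLen = 'i' := by
      have := getElem_takeWhile_length (fun x => x ≠ 'i') l (by rw [← htW, ← hi] at *; exact hiLen)
      simp only [decide_eq_false_iff_not, not_not] at this
      exact this
    set T := (tW.reverse.takeWhile pvNotOp).length with hT
    have hT_le : T ≤ i := by
      have := (List.takeWhile_prefix (l := tW.reverse) pvNotOp).length_le
      simpa [hi] using this
    have htake1 : l.take (i + 1) = tW ++ ['i'] := by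
      rw [List.take_add_one, List.getElem?_eq_getElem hiLen, htake, hgetI]
      rfl
    have hback : ImBack l i = (i : Int) - ((T : Int) + 1) := by
      rw [ImBack_eq l i hiLen, htake1]
      have hrev : (tW ++ ['i']).reverse = 'i' :: tW.reverse := by simp
      rw [hrev, List.takeWhile_cons]
      have hOpI : pvNotOp 'i' = true := rfl
      rw [hOpI]
      simp only [if_true, List.length_cons]
      push_cast
      ring
    rw [hfind']
    rw [if_neg (by omega : ¬ (i : Int) = -1)]
    rw [Int.toNat_natCast, hback]
    have hstart : (i : Int) - ((T : Int) + 1) + 1 = ((i - T : Nat) : Int) := by omega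
    rw [hstart]
    set coeff := (tW.reverse.takeWhile pvNotOp).reverse with hco
    have hcoeff_eq : coeff = (l.drop (i - T)).take T := by
      rw [hco, reverse_takeWhile_reverse, ← hi]
      conv_lhs => rw [← htake]
      rw [List.drop_take]
      congr 1 <;> rw [htake, ← hT] <;> omega
    rw [ImAltLoop_eq l [] (by simp), if_pos h]
    simp only [List.nil_append]
    rw [← htW, ← hco]
    by_cases hT0 : T = 0
    · have hii : ((i - T : Nat) : Int) = (i : Int) := by omega
      rw [hii, if_pos rfl]
      have hcnil : coeff = [] := by rw [hcoeff_eq, hT0]; simp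
      rw [hcnil]
      rfl
    · rw [if_neg (by omega : ¬ ((i - T : Nat) : Int) = (i : Int))]
      rw [foldl_range_get l (i - T) i (by omega) []]
      have hti : i - (i - T) = T := by omega
      rw [hti, List.nil_append, ← hcoeff_eq]
      have hcne : coeff ≠ [] := by
        rw [hcoeff_eq]
        intro hnil
        have hlen := congrArg List.length hnil
        simp only [List.length_take, List.length_drop, List.length_nil] at hlen
        omega
      unfold pvFinish
      rw [if_neg hcne]
  · rw [ImAltLoop_eq ch.toList [] (by simp), if_neg h]
    have : PySem.Str.find ch "i" = -1 := by
      rw [hfind, find_singleton_char, if_neg h]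
    rw [this, if_pos rfl]
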